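-- pv_equiv track=rewrite | github.com/t14916/waveformrecoupler | firesim_vcd_analysis.py | basic_assertion_analysis
-- ===== SOURCE A (Python) =====
-- def basic_assertion_analysis(assertion_data):
--     first_assert = None
--     last_assert = None
--     num_assertions = 0
--
--     for e in assertion_data.items():
--         if e[1]:
--             if first_assert is None:
--                 first_assert = e[0]
--             last_assert = e[0]
--             num_assertions += 1
--
--     return first_assert, last_assert, num_assertions
-- ===== SOURCE B (Python) =====
-- def basic_assertion_analysis(assertion_data):
--     items = list(assertion_data.items())
--
--     def solve(lo, hi):
--         # summary (first asserted key, last asserted key, count) of items[lo:hi]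
--         if hi - lo == 0:
--             return (None, None, 0)
--         if hi - lo == 1:
--             k, v = items[lo]
--             return (k, k, 1) if v else (None, None, 0)
--         mid = (lo + hi) // 2
--         fl, ll, nl = solve(lo, mid)
--         fr, lr, nr = solve(mid, hi)
--         return (fl if fl is not None else fr,
--                 lr if lr is not None else ll,
--                 nl + nr)
--
--     return solve(0, len(items))
-- ===== Notes on version B (the rewrite author's own statement) =====
-- stated objective: alternative
-- what changed: Replace the single linear pass with three running accumulators by a divide-and-conquer: split the items in half, recursively summarize each half as (first,last,count), and merge the two summaries.
import Mathlib
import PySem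

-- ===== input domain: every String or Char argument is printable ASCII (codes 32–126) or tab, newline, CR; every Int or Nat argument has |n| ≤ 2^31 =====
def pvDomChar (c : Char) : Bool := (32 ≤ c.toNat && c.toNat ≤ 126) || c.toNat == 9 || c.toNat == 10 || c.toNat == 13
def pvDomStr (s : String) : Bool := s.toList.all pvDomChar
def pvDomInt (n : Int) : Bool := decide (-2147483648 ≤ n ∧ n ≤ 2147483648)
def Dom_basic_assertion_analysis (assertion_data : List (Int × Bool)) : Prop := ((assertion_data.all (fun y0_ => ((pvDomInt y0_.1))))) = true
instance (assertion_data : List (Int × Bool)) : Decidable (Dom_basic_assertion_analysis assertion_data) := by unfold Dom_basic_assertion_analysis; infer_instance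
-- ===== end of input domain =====

-- B replaces A's one-pass triple accumulator by a divide-and-conquer merge of half-summaries (objective: alternative).

-- ===== PORT A =====
-- Port of A: one fold maintaining (first_assert, last_assert, num_assertions).
def basic_assertion_analysis (assertion_data : List (Int × Bool)) : Option Int × Option Int × Int :=
  assertion_data.foldl
    (fun st e =>
      if e.2 then
        ((match st.1 with | none => some e.1 | some f => some f), some e.1, st.2.2 + 1)
      else st)
    (none, none, 0)

-- ===== PORT B =====
-- Port of B's solve(lo, hi): the slice items[lo:hi] is the list argument here;
-- mid = (lo+hi)//2 corresponds to splitting at length/2 (Nat division = Python // on nonnegatives).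
def baaSolve (l : List (Int × Bool)) : Option Int × Option Int × Int :=
  match l with
  | [] => (none, none, 0)
  | [(k, v)] => if v then (some k, some k, 1) else (none, none, 0)
  | a :: b :: rest =>
    -- mid = (lo+hi)//2; left = solve of the first half, right = of the second half
    ((match (baaSolve ((a :: b :: rest).take ((a :: b :: rest).length / 2))).1 with
        | none => (baaSolve ((a :: b :: rest).drop ((a :: b :: rest).length / 2))).1
        | some f => some f),
     (match (baaSolve ((a :: b :: rest).drop ((a :: b :: rest).length / 2))).2.1 with
        | none => (baaSolve ((a :: b :: rest).take ((a :: b :: rest).length / 2))).2.1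
        | some x => some x),
     (baaSolve ((a :: b :: rest).take ((a :: b :: rest).length / 2))).2.2
       + (baaSolve ((a :: b :: rest).drop ((a :: b :: rest).length / 2))).2.2)
termination_by l.length
decreasing_by
  · simp [List.length_take]; omega
  · simp [List.length_drop]; omega

def basic_assertion_analysis_alt (assertion_data : List (Int × Bool)) : Option Int × Option Int × Int :=
  baaSolve assertion_data

-- ===== PRECONDITION & SPEC =====
def Spec_basic_assertion_analysis (assertion_data : List (Int × Bool)) (out : Option Int × Option Int × Int) : Prop := out = basic_assertion_analysis_alt assertion_data
instance (assertion_data : List (Int × Bool)) (out : Option Int × Option Int × Int) : Decidable (Spec_basic_assertion_analysis assertion_data out) := by unfold Spec_basic_assertion_analysis; infer_instance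

-- ===== CLAIM (what is proved, stated in full; the proofs are below) =====
def Claim_equal_basic_assertion_analysis : Prop := ∀ (assertion_data : List (Int × Bool)), Dom_basic_assertion_analysis assertion_data → Spec_basic_assertion_analysis assertion_data (basic_assertion_analysis assertion_data)

-- ===== LEMMAS AND PROOFS =====

-- Canonical value both sides compute: (head?, getLast?, length) of the asserted keys.
def baaCanon (l : List (Int × Bool)) : Option Int × Option Int × Int :=
  let ks := (l.filter (fun e => e.2)).map Prod.fst
  (ks.head?, ks.getLast?, (ks.length : Int))

theorem baaCanon_append (a b : List (Int × Bool)) :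
    baaCanon (a ++ b)
      = ((match (baaCanon a).1 with | none => (baaCanon b).1 | some f => some f),
         (match (baaCanon b).2.1 with | none => (baaCanon a).2.1 | some x => some x),
         (baaCanon a).2.2 + (baaCanon b).2.2) := by
  simp only [baaCanon, List.filter_append, List.map_append, List.head?_append,
    List.getLast?_append, List.length_append]
  refine Prod.ext ?_ (Prod.ext ?_ ?_)
  · cases ((a.filter (fun e => e.2)).map Prod.fst).head? <;> simp [Option.or]
  · cases ((b.filter (fun e => e.2)).map Prod.fst).getLast? <;> simp [Option.or]
  · push_cast; ring

theorem baaSolve_eq_canon (l : List (Int × Bool)) : baaSolve l = baaCanon l := by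
  fun_induction baaSolve l with
  | case1 => simp [baaCanon]
  | case2 k => simp [baaCanon]
  | case3 k v hv => simp [baaCanon, hv]
  | case4 a b rest ih1 ih2 =>
    simp only [ih1, ih2]
    have := baaCanon_append ((a :: b :: rest).take ((a :: b :: rest).length / 2))
      ((a :: b :: rest).drop ((a :: b :: rest).length / 2))
    rw [List.take_append_drop] at this
    exact this.symm

-- A's fold from an arbitrary state, characterised by baaCanon.
theorem baa_foldl_inv (d : List (Int × Bool)) (f l : Option Int) (n : Int) :
    d.foldl
      (fun st (e : Int × Bool) =>
        if e.2 then
          ((match st.1 with | none => some e.1 | some f => some f), some e.1, st.2.2 + 1)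
        else st)
      (f, l, n)
    = (f.or (baaCanon d).1, ((baaCanon d).2.1).or l, n + (baaCanon d).2.2) := by
  induction d generalizing f l n with
  | nil => simp [baaCanon]
  | cons a t ih =>
    by_cases hb : a.2
    · simp only [List.foldl_cons, hb, if_pos, baaCanon, List.filter_cons_of_pos, List.map_cons]
      rw [ih]
      cases f <;>
        cases hm : ((t.filter (fun e => e.2)).map Prod.fst) <;>
          simp [baaCanon, List.getLast?_cons, Option.or, hm] <;> omega
    · simp only [List.foldl_cons, if_neg hb]
      rw [ih]
      simp [baaCanon, List.filter_cons_of_neg (by simpa using hb)]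

-- ===== VERDICT (by name: the statement is the Claim_ definition above) =====
theorem basic_assertion_analysis_spec : Claim_equal_basic_assertion_analysis := by
  intro d _
  unfold Spec_basic_assertion_analysis basic_assertion_analysis basic_assertion_analysis_alt
  rw [baa_foldl_inv, baaSolve_eq_canon]
  cases hm : ((d.filter (fun e => e.2)).map Prod.fst) <;> simp [baaCanon, hm]
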